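-- pv_equiv track=rewrite | github.com/chiennt0109/tin247ctp | judge/checkers/utils.py | verify_matching
-- ===== SOURCE A (Python) =====
-- from collections import Counter
-- from typing import Iterable, List, Sequence, Tuple
--
-- def verify_matching(pairs: Sequence[Tuple[int, int]], edges: Iterable[Tuple[int, int]]) -> bool:
--     edge_set = set(edges)
--     left = Counter(a for a, _ in pairs)
--     right = Counter(b for _, b in pairs)
--     return (
--         all(c == 1 for c in left.values())
--         and all(c == 1 for c in right.values())
--         and all((a, b) in edge_set for a, b in pairs)
--     )
-- ===== SOURCE B (Python) =====
-- def verify_matching(pairs, edges):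
--     # sort-then-scan: adjacent-duplicate check on sorted endpoint lists,
--     # then a two-pointer merge of sorted(pairs) against sorted(edges)
--     lefts = sorted(a for a, _ in pairs)
--     rights = sorted(b for _, b in pairs)
--     for xs in (lefts, rights):
--         for i in range(len(xs) - 1):
--             if xs[i] == xs[i + 1]:
--                 return False
--     sp = sorted(pairs)
--     se = sorted(edges)
--     i = 0
--     for p in sp:
--         while i < len(se) and se[i] < p:
--             i += 1
--         if i == len(se) or se[i] != p:
--             return False
--     return True
-- ===== Notes on version B (the rewrite author's own statement) =====
-- stated objective: alternative
-- what changed: Replaces A's hash-based Counter builds and set membership with a sort-then-scan algorithm: duplicate endpoints are detected by adjacent comparison on the sorted endpoint lists, and edge validity by a two-pointer merge of sorted(pairs) against sorted(edges).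
import Mathlib
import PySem

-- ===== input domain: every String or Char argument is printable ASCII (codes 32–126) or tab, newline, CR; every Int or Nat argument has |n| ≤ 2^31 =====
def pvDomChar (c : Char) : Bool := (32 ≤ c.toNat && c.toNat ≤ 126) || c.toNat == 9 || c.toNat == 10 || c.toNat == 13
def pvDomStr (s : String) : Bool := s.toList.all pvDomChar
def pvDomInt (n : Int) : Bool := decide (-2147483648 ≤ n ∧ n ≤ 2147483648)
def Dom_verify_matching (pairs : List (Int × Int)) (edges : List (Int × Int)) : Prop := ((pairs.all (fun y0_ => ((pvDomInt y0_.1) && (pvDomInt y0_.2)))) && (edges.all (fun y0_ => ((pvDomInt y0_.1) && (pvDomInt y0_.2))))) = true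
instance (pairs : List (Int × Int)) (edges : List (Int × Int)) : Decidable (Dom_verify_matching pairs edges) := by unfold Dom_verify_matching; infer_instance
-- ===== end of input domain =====

-- B replaces A's hash-based Counter/set passes by sort-then-scan: adjacent-duplicate
-- checks on the sorted endpoint lists and a two-pointer merge of sorted(pairs)
-- against sorted(edges) (alternative algorithm, same result).

-- ===== PORT A =====
def verify_matching (pairs : List (Int × Int)) (edges : List (Int × Int)) : Bool :=
  let edge_set := PySem.Set.ofList edges
  let left := PySem.Dict.counter (pairs.map Prod.fst)
  let right := PySem.Dict.counter (pairs.map Prod.snd)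
  (left.values.all fun c => c == 1) &&
  (right.values.all fun c => c == 1) &&
  (pairs.all fun p => PySem.Set.contains edge_set p)

-- ===== PORT B =====
-- inner loop 'for i in range(len(xs)-1): if xs[i] == xs[i+1]: return False'
def vmAdjDup : List Int → Bool
  | x :: y :: rest => x == y || vmAdjDup (y :: rest)
  | _ => false

-- Python tuple comparison e < p on 2-tuples of ints
def vmPairLt (e p : Int × Int) : Bool := e.1 < p.1 || (e.1 == p.1 && e.2 < p.2)

-- the 'while i < len(se) and se[i] < p: i += 1' pointer advance
def vmSkip (p : Int × Int) : List (Int × Int) → List (Int × Int)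
  | [] => []
  | e :: rest => if vmPairLt e p then vmSkip p rest else e :: rest

-- the merge loop over sp
def vmMerge : List (Int × Int) → List (Int × Int) → Bool
  | [], _ => true
  | p :: sp, se =>
    match vmSkip p se with
    | [] => false
    | e :: rest => if e == p then vmMerge sp (e :: rest) else false

def verify_matching_alt (pairs : List (Int × Int)) (edges : List (Int × Int)) : Bool :=
  if vmAdjDup (PySem.List.sorted (pairs.map Prod.fst) (fun x => x) false) ||
      vmAdjDup (PySem.List.sorted (pairs.map Prod.snd) (fun x => x) false) then false
  else
    vmMerge (PySem.List.sorted2 pairs Prod.fst Prod.snd false)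
            (PySem.List.sorted2 edges Prod.fst Prod.snd false)

-- ===== PRECONDITION & SPEC =====
def Spec_verify_matching (pairs : List (Int × Int)) (edges : List (Int × Int)) (out : Bool) : Prop := out = verify_matching_alt pairs edges
instance (pairs : List (Int × Int)) (edges : List (Int × Int)) (out : Bool) : Decidable (Spec_verify_matching pairs edges out) := by unfold Spec_verify_matching; infer_instance

-- ===== CLAIM (what is proved, stated in full; the proofs are below) =====
def Claim_equal_verify_matching : Prop := ∀ (pairs : List (Int × Int)) (edges : List (Int × Int)), Dom_verify_matching pairs edges → Spec_verify_matching pairs edges (verify_matching pairs edges)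

-- ===== LEMMAS AND PROOFS =====

-- Canonical characterisation both programs are proved to compute.
def vmGood (pairs : List (Int × Int)) (edges : List (Int × Int)) : Prop :=
  (pairs.map Prod.fst).Nodup ∧ (pairs.map Prod.snd).Nodup ∧ ∀ p ∈ pairs, p ∈ edges

lemma counter_values_all_one (xs : List Int) :
    (∀ x ∈ (PySem.Dict.counter xs).values, (x == 1) = true) ↔ xs.Nodup := by
  simp [PySem.Dict.values, PySem.Dict.items_counter,
    PySem.Set.mem_ofList, List.nodup_iff_count_eq_one]

lemma verify_matching_iff (pairs edges : List (Int × Int)) :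
    verify_matching pairs edges = true ↔ vmGood pairs edges := by
  unfold verify_matching vmGood
  simp only [Bool.and_eq_true, counter_values_all_one, List.all_eq_true,
    PySem.Set.contains_iff, PySem.Set.mem_ofList, and_assoc]

lemma vmAdjDup_eq_false_iff (ys : List Int) (h : ys.Pairwise (fun a b => a ≤ b)) :
    vmAdjDup ys = false ↔ ys.Nodup := by
  induction ys with
  | nil => simp [vmAdjDup]
  | cons x t ih =>
    cases t with
    | nil => simp [vmAdjDup]
    | cons y r =>
      rw [List.pairwise_cons] at h
      obtain ⟨hx, ht⟩ := h
      simp only [vmAdjDup, Bool.or_eq_false_iff, beq_eq_false_iff_ne, ih ht,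
        List.nodup_cons, List.mem_cons]
      constructor
      · rintro ⟨hne, hnd⟩
        refine ⟨fun hmem => ?_, hnd⟩
        rcases hmem with hxy | hz
        · exact hne hxy
        · -- x ∈ r: x ≤ y (head) and y ≤ x (pairwise of tail), so x = y
          have hy : y ≤ x := (List.pairwise_cons.1 ht).1 x hz
          have hx' : x ≤ y := hx y (by simp)
          exact hne (le_antisymm hx' hy)
      · rintro ⟨hn, hnd⟩
        exact ⟨fun hxy => hn (Or.inl hxy), hnd⟩

lemma sorted_nodup_iff (xs : List Int) :
    vmAdjDup (PySem.List.sorted xs (fun x => x) false) = false ↔ xs.Nodup := by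
  rw [vmAdjDup_eq_false_iff _ (PySem.List.sorted_pairwise xs (fun x => x))]
  exact (PySem.List.sorted_perm xs (fun x => x) false).nodup_iff

lemma vmPairLt_iff (e p : Int × Int) : vmPairLt e p = true ↔ toLex e < toLex p := by
  simp only [vmPairLt, Bool.or_eq_true, Bool.and_eq_true, decide_eq_true_eq,
    beq_iff_eq, Prod.Lex.lt_iff, ofLex_toLex]

lemma vmSkip_sublist (p : Int × Int) (se : List (Int × Int)) :
    (vmSkip p se).Sublist se := by
  induction se with
  | nil => simp [vmSkip]
  | cons e rest ih =>
    simp only [vmSkip]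
    split
    · exact ih.trans (List.sublist_cons_self e rest)
    · exact List.Sublist.refl _

lemma mem_vmSkip (p x : Int × Int) (se : List (Int × Int))
    (hx : x ∈ se) (hle : toLex p ≤ toLex x) : x ∈ vmSkip p se := by
  induction se with
  | nil => cases hx
  | cons e rest ih =>
    simp only [vmSkip]
    split
    · rename_i hlt
      rw [vmPairLt_iff] at hlt
      rcases List.mem_cons.1 hx with rfl | hx'
      · exact absurd (lt_of_lt_of_le hlt hle) (lt_irrefl _)
      · exact ih hx'
    · exact hx

lemma vmMerge_iff (sp : List (Int × Int)) (se : List (Int × Int))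
    (hsp : sp.Pairwise (fun a b => toLex a ≤ toLex b))
    (hse : se.Pairwise (fun a b => toLex a ≤ toLex b)) :
    vmMerge sp se = true ↔ ∀ p ∈ sp, p ∈ se := by
  induction sp generalizing se with
  | nil => simp [vmMerge]
  | cons p sp ih =>
    rw [List.pairwise_cons] at hsp
    obtain ⟨hp, hsp'⟩ := hsp
    rcases hsk : vmSkip p se with _ | ⟨e, rest⟩
    · simp only [vmMerge, hsk]
      simp only [Bool.false_eq_true, false_iff]
      intro h
      have := mem_vmSkip p p se (h p (by simp)) (le_refl _)
      rw [hsk] at this; cases this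
    · simp only [vmMerge, hsk]
      have hsub : (e :: rest).Sublist se := hsk ▸ vmSkip_sublist p se
      have hpe : ¬ vmPairLt e p = true := by
        -- e is the first non-skipped element
        clear ih hse hsub
        induction se with
        | nil => cases hsk
        | cons f t ihs =>
          simp only [vmSkip] at hsk
          split at hsk
          · exact ihs hsk
          · rename_i h; cases hsk; exact h
      rw [vmPairLt_iff, not_lt] at hpe
      split
      · rename_i heq
        rw [beq_iff_eq] at heq
        subst heq
        rw [ih (e :: rest) hsp' (hse.sublist hsub)]
        constructor
        · intro h q hq
          rcases List.mem_cons.1 hq with rfl | hq'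
          · exact hsub.mem (by simp)
          · exact hsub.mem (h q hq')
        · intro h q hq
          have hm := mem_vmSkip e q se (h q (List.mem_cons_of_mem _ hq)) (hp q hq)
          rwa [hsk] at hm
      · rename_i hne
        rw [beq_iff_eq] at hne
        simp only [Bool.false_eq_true, false_iff]
        intro h
        have hpse : p ∈ vmSkip p se := mem_vmSkip p p se (h p (by simp)) (le_refl _)
        rw [hsk] at hpse
        rcases List.mem_cons.1 hpse with rfl | hpr
        · exact hne rfl
        · -- p ∈ rest, but e ≤ everything in rest and p ≤ e, so p = e
          have he_le : toLex e ≤ toLex p :=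
            (List.pairwise_cons.1 (hse.sublist hsub)).1 p hpr
          exact hne (toLex.injective (le_antisymm he_le hpe))

lemma sorted2_eq_sorted_toLex (xs : List (Int × Int)) :
    PySem.List.sorted2 xs Prod.fst Prod.snd false
      = PySem.List.sorted xs (fun p => toLex p) false := by
  have hbf : (fun (a b : Int × Int) =>
        decide (a.1 < b.1) || (!decide (b.1 < a.1) && decide (a.2 < b.2)))
      = (fun (a b : Int × Int) => decide (toLex a < toLex b)) := by
    funext a b
    have hl : (toLex a < toLex b) ↔ (a.1 < b.1 ∨ a.1 = b.1 ∧ a.2 < b.2) := by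
      rw [Prod.Lex.lt_iff]; simp
    rw [Bool.eq_iff_iff]
    simp only [Bool.or_eq_true, Bool.and_eq_true, Bool.not_eq_true',
      decide_eq_true_eq, decide_eq_false_iff_not, hl]
    omega
  unfold PySem.List.sorted2 PySem.List.sorted
  simp only [if_neg (by decide : ¬ (false = true))]
  congr 1
  funext acc x
  rw [hbf]

lemma verify_matching_alt_iff (pairs edges : List (Int × Int)) :
    verify_matching_alt pairs edges = true ↔ vmGood pairs edges := by
  unfold verify_matching_alt vmGood
  split
  · rename_i h
    rw [Bool.or_eq_true] at h
    simp only [Bool.false_eq_true, false_iff]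
    rintro ⟨h1, h2, _⟩
    rcases h with h | h
    · rw [← sorted_nodup_iff] at h1; simp [h1] at h
    · rw [← sorted_nodup_iff] at h2; simp [h2] at h
  · rename_i h
    rw [Bool.or_eq_true, not_or, Bool.not_eq_true, Bool.not_eq_true] at h
    obtain ⟨h1, h2⟩ := h
    rw [sorted_nodup_iff] at h1 h2
    rw [sorted2_eq_sorted_toLex, sorted2_eq_sorted_toLex,
      vmMerge_iff _ _ (PySem.List.sorted_pairwise pairs (fun p => toLex p))
        (PySem.List.sorted_pairwise edges (fun p => toLex p))]
    constructor
    · intro h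
      refine ⟨h1, h2, fun p hp => ?_⟩
      have := h p (by rw [PySem.List.mem_sorted]; exact hp)
      rwa [PySem.List.mem_sorted] at this
    · rintro ⟨_, _, h3⟩ p hp
      rw [PySem.List.mem_sorted] at hp ⊢
      exact h3 p hp

-- ===== VERDICT (by name: the statement is the Claim_ definition above) =====
theorem verify_matching_spec : Claim_equal_verify_matching := by
  intro pairs edges _
  unfold Spec_verify_matching
  rcases h : verify_matching_alt pairs edges with _ | _
  · rw [Bool.eq_false_iff]
    intro hA
    exact absurd ((verify_matching_alt_iff pairs edges).2
      ((verify_matching_iff pairs edges).1 hA)) (by simp [h])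
  · exact (verify_matching_iff pairs edges).2 ((verify_matching_alt_iff pairs edges).1 h)
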